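-- pv_equiv track=rewrite | github.com/SunLab-biotool/CICADA | CICADA.py | TwoLineFasta
-- ===== SOURCE A (Python) =====
-- def TwoLineFasta (Seq_Array):
--     Tmp_sequence_Arr = []
--     Tmp_trans_str = ''
--     for i in range(len(Seq_Array)):
--         if '>' in Seq_Array[i]:
--             if i == 0:
--                 Tmp_sequence_Arr.append(Seq_Array[i])
--             else:
--                 Tmp_sequence_Arr.append(Tmp_trans_str)
--                 Tmp_sequence_Arr.append(Seq_Array[i])
--                 Tmp_trans_str = ''
--         else:
--             if i == len(Seq_Array) - 1:
--                 Tmp_trans_str = Tmp_trans_str + str(Seq_Array[i])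
--                 Tmp_sequence_Arr.append(Tmp_trans_str)
--             else:
--                 Tmp_trans_str = Tmp_trans_str + str(Seq_Array[i])
--     return Tmp_sequence_Arr
-- ===== SOURCE B (Python) =====
-- def TwoLineFasta(Seq_Array):
--     # Single reverse traversal building the output back-to-front.
--     out = []           # result lines, collected in reverse order; reversed once at the end
--     run = None         # lines of the pending sequence run, in reverse order (None = nothing seen yet)
--     for line in reversed(Seq_Array):
--         if '>' in line:
--             if run is not None:
--                 out.append(''.join(reversed(run)))
--             out.append(line)
--             run = []
--         else:
--             if run is None:
--                 run = [line]
--             else: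
--                 run.append(line)
--     if run is not None and Seq_Array and '>' not in Seq_Array[0]:
--         out.append(''.join(reversed(run)))
--     out.reverse()
--     return out
-- ===== Notes on version B (the rewrite author's own statement) =====
-- stated objective: alternative
-- what changed: Replaces A's forward index loop with i==0 / i==len-1 special cases and a stateful trans-string accumulator by a single reverse traversal that builds the output back-to-front, merging sequence lines into a pending run (None = nothing yet) and flushing it at each header; the trailing-run rule falls out of one final check on the first line.
import Mathlib
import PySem

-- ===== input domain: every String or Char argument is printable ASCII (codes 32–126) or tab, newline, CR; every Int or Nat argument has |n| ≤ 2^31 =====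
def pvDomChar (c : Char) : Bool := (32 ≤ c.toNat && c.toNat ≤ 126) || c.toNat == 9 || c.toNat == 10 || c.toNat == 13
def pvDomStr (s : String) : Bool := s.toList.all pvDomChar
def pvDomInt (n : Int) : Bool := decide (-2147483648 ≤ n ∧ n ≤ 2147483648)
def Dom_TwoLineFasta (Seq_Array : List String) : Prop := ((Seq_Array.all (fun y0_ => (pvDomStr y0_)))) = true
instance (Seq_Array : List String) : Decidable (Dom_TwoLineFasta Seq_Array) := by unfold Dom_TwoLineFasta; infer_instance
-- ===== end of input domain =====

-- B rewrites A's forward stateful accumulation as a single reverse traversal that builds the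
-- output back-to-front with a pending-run state (objective: alternative decomposition, same cost).

-- ===== PORT A =====
-- '>' in line
def pvHasGt (line : String) : Bool := PySem.Str.isIn ">" line

-- A's for-loop: state = (accumulated output, Tmp_trans_str); 'first' is the i == 0 test,
-- 't = []' is the i == len(Seq_Array) - 1 test.
def pvGoA (rest : List String) (acc : List String) (trans : String) (first : Bool) : List String :=
  match rest with
  | [] => acc
  | l :: t =>
    if pvHasGt l then
      if first then pvGoA t (acc ++ [l]) trans false
      else pvGoA t (acc ++ [trans, l]) "" false
    else
      if t = [] then acc ++ [trans ++ l]
      else pvGoA t acc (trans ++ l) false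

def TwoLineFasta (Seq_Array : List String) : List String :=
  pvGoA Seq_Array [] "" true

-- ===== PORT B =====
-- one step of B's loop; state = (out, run); run = none models Python's None, a 'some'
-- run holds the pending sequence lines in reverse order, exactly like Source B's list 'run'
def pvStepB (p : List String × Option (List String)) (line : String) :
    List String × Option (List String) :=
  if pvHasGt line then
    ((match p.2 with
      | none => p.1
      | some r => p.1 ++ [PySem.Str.join "" r.reverse]) ++ [line], some [])
  else
    (p.1, some (match p.2 with | none => [line] | some r => r ++ [line]))

def TwoLineFasta_alt (Seq_Array : List String) : List String :=
  -- 'for line in reversed(Seq_Array)' with appends = foldl over the reversed list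
  let p := Seq_Array.reverse.foldl pvStepB ([], none)
  -- 'if run is not None and Seq_Array and '>' not in Seq_Array[0]: out.append(...)', then 'out.reverse()'
  (match p.2, Seq_Array with
   | some r, x0 :: _ =>
     if pvHasGt x0 then p.1 else p.1 ++ [PySem.Str.join "" r.reverse]
   | _, _ => p.1).reverse

-- ===== PRECONDITION & SPEC =====
def Spec_TwoLineFasta (Seq_Array : List String) (out : List String) : Prop := out = TwoLineFasta_alt Seq_Array
instance (Seq_Array : List String) (out : List String) : Decidable (Spec_TwoLineFasta Seq_Array out) := by unfold Spec_TwoLineFasta; infer_instance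

-- ===== CLAIM (what is proved, stated in full; the proofs are below) =====
def Claim_equal_TwoLineFasta : Prop := ∀ (Seq_Array : List String), Dom_TwoLineFasta Seq_Array → Spec_TwoLineFasta Seq_Array (TwoLineFasta Seq_Array)

-- ===== LEMMAS AND PROOFS =====

-- ''.join on one more string
theorem pvJoin_cons (a : String) (xs : List String) :
    PySem.Str.join "" (a :: xs) = a ++ PySem.Str.join "" xs := by
  cases xs with
  | nil => simp [PySem.Str.join, PySem.Chars.join, List.intercalate]
  | cons b ys => simp [PySem.Str.join, PySem.Chars.join, List.intercalate, String.ofList_append]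

theorem pvJoin_nil : PySem.Str.join "" ([] : List String) = "" := rfl

-- one-step unfolding of A's loop (used to unfold exactly one iteration at a time)
theorem pvGoA_cons (l : String) (t acc : List String) (trans : String) (first : Bool) :
    pvGoA (l :: t) acc trans first =
      if pvHasGt l then
        if first then pvGoA t (acc ++ [l]) trans false
        else pvGoA t (acc ++ [trans, l]) "" false
      else
        if t = [] then acc ++ [trans ++ l]
        else pvGoA t acc (trans ++ l) false := by
  rw [pvGoA]

theorem pvGoA_nil (acc : List String) (trans : String) (first : Bool) :
    pvGoA [] acc trans first = acc := rfl

-- one-step reductions of B's state transformer, by case on the line and the pending run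
theorem pvStepB_header {l : String} {r : List String} {p : List String × Option (List String)}
    (hl : pvHasGt l = true) (hr : p.2 = some r) :
    pvStepB p l = (p.1 ++ [PySem.Str.join "" r.reverse, l], some []) := by
  obtain ⟨o, run⟩ := p
  cases run with
  | none => simp at hr
  | some r' =>
    obtain rfl : r' = r := by simpa using hr
    simp [pvStepB, hl]

theorem pvStepB_header_none {l : String} {p : List String × Option (List String)}
    (hl : pvHasGt l = true) (hr : p.2 = none) : pvStepB p l = (p.1 ++ [l], some []) := by
  obtain ⟨o, run⟩ := p
  cases run with
  | none => simp [pvStepB, hl]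
  | some r' => simp at hr

theorem pvStepB_seq {l : String} {r : List String} {p : List String × Option (List String)}
    (hl : pvHasGt l = false) (hr : p.2 = some r) : pvStepB p l = (p.1, some (r ++ [l])) := by
  obtain ⟨o, run⟩ := p
  cases run with
  | none => simp at hr
  | some r' =>
    obtain rfl : r' = r := by simpa using hr
    simp [pvStepB, hl]

theorem pvStepB_seq_none {l : String} {p : List String × Option (List String)}
    (hl : pvHasGt l = false) (hr : p.2 = none) : pvStepB p l = (p.1, some [l]) := by
  obtain ⟨o, run⟩ := p
  cases run with
  | none => simp [pvStepB, hl]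
  | some r' => simp at hr

-- after processing a nonempty suffix, B's run state is never None
theorem pvRun_some (l : String) (t : List String) :
    ∃ r, ((l :: t).foldr (fun line p => pvStepB p line) ([], none)).2 = some r := by
  simp only [List.foldr_cons, pvStepB]
  split
  · exact ⟨[], rfl⟩
  · exact ⟨_, rfl⟩

-- main invariant: A's loop on a nonempty remainder, past the first element, returns the
-- accumulator, then (pending trans ++ the joined run B is holding), then B's collected
-- output (both of B's components read back-to-front).
theorem pvGoA_eq_foldr (t : List String) (ht : t ≠ []) :
    ∀ (acc : List String) (s : String),
      pvGoA t acc s false =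
        acc ++ ((s ++ PySem.Str.join ""
                  (((t.foldr (fun line p => pvStepB p line) ([], none)).2.getD []).reverse)) ::
                 (t.foldr (fun line p => pvStepB p line) ([], none)).1.reverse) := by
  induction t with
  | nil => exact absurd rfl ht
  | cons l t' ih =>
    intro acc s
    rw [pvGoA_cons]
    by_cases hl : pvHasGt l
    · -- header line
      rw [if_pos hl, if_neg Bool.false_ne_true]
      cases t' with
      | nil =>
        rw [pvGoA_nil,
          show List.foldr (fun line p => pvStepB p line) ([], none) [l] = pvStepB ([], none) l
            from rfl,
          pvStepB_header_none hl rfl]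
        simp [pvJoin_nil, String.append_empty]
      | cons l' t'' =>
        obtain ⟨r, hr⟩ := pvRun_some l' t''
        rw [ih (by simp) _ "", hr,
          show List.foldr (fun line p => pvStepB p line) ([], none) (l :: l' :: t'') =
            pvStepB (List.foldr (fun line p => pvStepB p line) ([], none) (l' :: t'')) l
            from rfl,
          pvStepB_header hl hr]
        simp [pvJoin_nil, String.append_empty, String.empty_append]
    · -- sequence line
      rw [if_neg hl]
      have hl' : pvHasGt l = false := by simpa using hl
      cases t' with
      | nil =>
        rw [if_pos rfl,
          show List.foldr (fun line p => pvStepB p line) ([], none) [l] = pvStepB ([], none) l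
            from rfl,
          pvStepB_seq_none hl' rfl]
        simp [pvJoin_cons, pvJoin_nil, String.append_empty]
      | cons l' t'' =>
        obtain ⟨r, hr⟩ := pvRun_some l' t''
        rw [if_neg (by simp), ih (by simp), hr,
          show List.foldr (fun line p => pvStepB p line) ([], none) (l :: l' :: t'') =
            pvStepB (List.foldr (fun line p => pvStepB p line) ([], none) (l' :: t'')) l
            from rfl,
          pvStepB_seq hl' hr]
        simp [pvJoin_cons, String.append_assoc]

theorem pvEq (xs : List String) : TwoLineFasta xs = TwoLineFasta_alt xs := by
  cases xs with
  | nil => rfl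
  | cons l t =>
    rw [TwoLineFasta, pvGoA_cons]
    simp only [TwoLineFasta_alt, List.foldl_reverse]
    by_cases hl : pvHasGt l
    · -- first line is a header
      rw [if_pos hl, if_pos trivial]
      cases t with
      | nil =>
        rw [pvGoA_nil,
          show List.foldr (fun line p => pvStepB p line) ([], none) [l] = pvStepB ([], none) l
            from rfl,
          pvStepB_header_none hl rfl]
        simp [hl]
      | cons l' t'' =>
        obtain ⟨r', hr'⟩ := pvRun_some l' t''
        rw [pvGoA_eq_foldr (l' :: t'') (by simp), hr',
          show List.foldr (fun line p => pvStepB p line) ([], none) (l :: l' :: t'') =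
            pvStepB (List.foldr (fun line p => pvStepB p line) ([], none) (l' :: t'')) l
            from rfl,
          pvStepB_header hl hr']
        simp [hl, String.empty_append]
    · -- first line is a sequence line
      rw [if_neg hl]
      have hl' : pvHasGt l = false := by simpa using hl
      cases t with
      | nil =>
        rw [if_pos rfl,
          show List.foldr (fun line p => pvStepB p line) ([], none) [l] = pvStepB ([], none) l
            from rfl,
          pvStepB_seq_none hl' rfl]
        simp [hl', pvJoin_cons, pvJoin_nil, String.empty_append, String.append_empty]
      | cons l' t'' =>
        obtain ⟨r', hr'⟩ := pvRun_some l' t''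
        rw [if_neg (by simp), pvGoA_eq_foldr (l' :: t'') (by simp), hr',
          show List.foldr (fun line p => pvStepB p line) ([], none) (l :: l' :: t'') =
            pvStepB (List.foldr (fun line p => pvStepB p line) ([], none) (l' :: t'')) l
            from rfl,
          pvStepB_seq hl' hr']
        simp [hl', pvJoin_cons, String.empty_append]

-- ===== VERDICT (by name: the statement is the Claim_ definition above) =====
theorem TwoLineFasta_spec : Claim_equal_TwoLineFasta := by
  intro xs _
  unfold Spec_TwoLineFasta
  exact pvEq xs
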